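-- pv_equiv track=rewrite | github.com/smohapatra1/scripting | python/practice/start_again/2025/01172025/max_length_prefix_as_subsequence.py | MaxPrefix
-- ===== SOURCE A (Python) =====
-- def MaxPrefix(S, T):
--     count = 0
--     for i in range(0, len(T)):
--         if count == len(S):
--             break
--         if T[i] == S[count]:
--             count = count +1
--     return count
-- ===== SOURCE B (Python) =====
-- def MaxPrefix(S, T):
--     # Binary search on the answer: "S[:k] is a subsequence of T" is monotone in k,
--     # so the maximal such k is found by bisection over [0, min(len(S), len(T))].
--     def is_subseq(p):
--         j = 0
--         for t in T:
--             if j < len(p) and t == p[j]: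
--                 j += 1
--         return j == len(p)
--     lo, hi = 0, min(len(S), len(T))
--     while lo < hi:
--         mid = (lo + hi + 1) // 2
--         if is_subseq(S[:mid]):
--             lo = mid
--         else:
--             hi = mid - 1
--     return lo
-- ===== Notes on version B (the rewrite author's own statement) =====
-- stated objective: alternative
-- what changed: B binary-searches the answer length k over [0, min(len(S),len(T))], re-testing at each probe whether S[:k] is a subsequence of T with a staged membership scan, instead of A's single greedy left-to-right pass over T with a running counter.
import Mathlib
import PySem

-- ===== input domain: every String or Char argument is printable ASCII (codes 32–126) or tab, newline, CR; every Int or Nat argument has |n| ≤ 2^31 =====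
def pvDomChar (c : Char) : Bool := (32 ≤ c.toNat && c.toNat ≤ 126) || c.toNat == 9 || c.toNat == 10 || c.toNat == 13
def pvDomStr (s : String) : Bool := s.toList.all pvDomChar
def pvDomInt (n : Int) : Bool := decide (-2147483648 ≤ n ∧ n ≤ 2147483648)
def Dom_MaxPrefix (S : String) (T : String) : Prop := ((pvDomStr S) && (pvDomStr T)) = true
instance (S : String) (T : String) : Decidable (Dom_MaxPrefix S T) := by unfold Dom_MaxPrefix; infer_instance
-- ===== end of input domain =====

-- B replaces A's single greedy pass over T by a binary search on the answer length k
-- (monotone predicate "S[:k] is a subsequence of T"); return values are provably equal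
-- on all inputs (no precondition). B is not faster; it is an alternative algorithm.

-- ===== PORT A =====
-- A's loop over T with state `count`; `S.getD count default` is only read when count < S.length
-- (the `count = S.length` break is checked first), so it is exact for Python's S[count] here.
def aGo (S : List Char) : List Char → Nat → Nat
  | [], count => count
  | t :: ts, count =>
      if count = S.length then count
      else if t = S.getD count default then aGo S ts (count + 1)
      else aGo S ts count

def MaxPrefix (S : String) (T : String) : Int :=
  (aGo S.toList T.toList 0 : Int)

-- ===== PORT B =====
-- inner helper is_subseq: `j = 0; for t in T: if j < len(p) and t == p[j]: j += 1; return j == len(p)`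
def subGo (p : List Char) : List Char → Nat → Nat
  | [], j => j
  | t :: ts, j =>
      subGo p ts (if j < p.length ∧ t = p.getD j default then j + 1 else j)

def isSub (p T : List Char) : Bool := subGo p T 0 == p.length

-- the `while lo < hi` bisection loop
def bs (S T : List Char) (lo hi : Nat) : Nat :=
  if _h : lo < hi then
    let mid := (lo + hi + 1) / 2
    if isSub (S.take mid) T then bs S T mid hi else bs S T lo (mid - 1)
  else lo
termination_by hi - lo
decreasing_by all_goals omega

def MaxPrefix_alt (S : String) (T : String) : Int :=
  (bs S.toList T.toList 0 (min S.toList.length T.toList.length) : Int)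

-- ===== PRECONDITION & SPEC =====
def Spec_MaxPrefix (S : String) (T : String) (out : Int) : Prop := out = MaxPrefix_alt S T
instance (S : String) (T : String) (out : Int) : Decidable (Spec_MaxPrefix S T out) := by unfold Spec_MaxPrefix; infer_instance

-- ===== CLAIM (what is proved, stated in full; the proofs are below) =====
def Claim_equal_MaxPrefix : Prop := ∀ (S : String) (T : String), Dom_MaxPrefix S T → Spec_MaxPrefix S T (MaxPrefix S T)

-- ===== LEMMAS AND PROOFS =====

-- reference greedy matcher, recursing on both lists
def greedy : List Char → List Char → Nat
  | _, [] => 0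
  | [], _ :: _ => 0
  | s :: ss, t :: ts => if t = s then 1 + greedy ss ts else greedy (s :: ss) ts

theorem greedy_nil (ss : List Char) : greedy ss [] = 0 := by
  cases ss <;> rfl

theorem greedy_nil_left (ts : List Char) : greedy [] ts = 0 := by
  cases ts <;> rfl

theorem greedy_le_left : ∀ (ts ss : List Char), greedy ss ts ≤ ss.length := by
  intro ts
  induction ts with
  | nil => intro ss; simp [greedy_nil]
  | cons t ts ih =>
    intro ss
    cases ss with
    | nil => simp [greedy_nil_left]
    | cons s ss =>
      by_cases h : t = s
      · have := ih ss; simp [greedy, h]; omega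
      · have := ih (s :: ss); simp only [greedy, if_neg h]; simpa using this

theorem greedy_le_right : ∀ (ts ss : List Char), greedy ss ts ≤ ts.length := by
  intro ts
  induction ts with
  | nil => intro ss; simp [greedy_nil]
  | cons t ts ih =>
    intro ss
    cases ss with
    | nil => simp [greedy_nil_left]
    | cons s ss =>
      by_cases h : t = s
      · have := ih ss; simp [greedy, h]; omega
      · have := ih (s :: ss); simp only [greedy, if_neg h, List.length_cons]; omega

-- A's loop computes the greedy match count
theorem aGo_eq (S : List Char) (ts : List Char) :
    ∀ count, count ≤ S.length → aGo S ts count = count + greedy (S.drop count) ts := by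
  induction ts with
  | nil => intro count _; simp [aGo, greedy_nil]
  | cons t ts ih =>
    intro count hle
    by_cases hc : count = S.length
    · subst hc; simp [aGo, greedy_nil_left]
    · have hlt : count < S.length := lt_of_le_of_ne hle hc
      have hdrop : S.drop count = S[count] :: S.drop (count + 1) :=
        List.drop_eq_getElem_cons hlt
      have hgetD : S.getD count default = S[count] := List.getD_eq_getElem S default hlt
      by_cases ht : t = S[count]
      · have h1 : aGo S (t :: ts) count = aGo S ts (count + 1) := by
          simp only [aGo]; rw [if_neg hc, hgetD, if_pos ht]
        have h2 : greedy (S.drop count) (t :: ts) = 1 + greedy (S.drop (count + 1)) ts := by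
          rw [hdrop, greedy]; simp [ht]
        rw [h1, ih (count + 1) hlt, h2]; omega
      · have h1 : aGo S (t :: ts) count = aGo S ts count := by
          simp only [aGo]; rw [if_neg hc, hgetD, if_neg ht]
        have h2 : greedy (S.drop count) (t :: ts) = greedy (S.drop count) ts := by
          conv_lhs => rw [hdrop, greedy]
          rw [if_neg ht, ← hdrop]
        rw [h1, ih count hle, h2]

-- B's inner scan computes the greedy match count of the remaining pattern
theorem subGo_eq (p : List Char) (ts : List Char) :
    ∀ j, j ≤ p.length → subGo p ts j = j + greedy (p.drop j) ts := by
  induction ts with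
  | nil => intro j _; simp [subGo, greedy_nil]
  | cons t ts ih =>
    intro j hle
    by_cases hj : j < p.length
    · have hdrop : p.drop j = p[j] :: p.drop (j + 1) := List.drop_eq_getElem_cons hj
      have hgetD : p.getD j default = p[j] := List.getD_eq_getElem p default hj
      by_cases ht : t = p[j]
      · have h1 : subGo p (t :: ts) j = subGo p ts (j + 1) := by
          simp only [subGo]; rw [if_pos ⟨hj, by rw [hgetD]; exact ht⟩]
        have h2 : greedy (p.drop j) (t :: ts) = 1 + greedy (p.drop (j + 1)) ts := by
          rw [hdrop, greedy]; simp [ht]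
        rw [h1, ih (j + 1) hj, h2]; omega
      · have h1 : subGo p (t :: ts) j = subGo p ts j := by
          simp only [subGo]
          rw [if_neg (by rw [hgetD]; exact fun h => ht h.2)]
        have h2 : greedy (p.drop j) (t :: ts) = greedy (p.drop j) ts := by
          conv_lhs => rw [hdrop, greedy]
          rw [if_neg ht, ← hdrop]
        rw [h1, ih j hle, h2]
    · have hj' : j = p.length := by omega
      subst hj'
      have h1 : subGo p (t :: ts) p.length = subGo p ts p.length := by
        simp [subGo]
      rw [h1, ih p.length le_rfl]
      simp [List.drop_length, greedy_nil_left]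

-- truncating the pattern truncates the greedy count
theorem greedy_take : ∀ (ts ss : List Char) (k : Nat),
    greedy (ss.take k) ts = min k (greedy ss ts) := by
  intro ts
  induction ts with
  | nil => intro ss k; simp [greedy_nil]
  | cons t ts ih =>
    intro ss k
    cases ss with
    | nil => simp [greedy_nil_left]
    | cons s ss =>
      cases k with
      | zero => simp [greedy_nil_left]
      | succ k =>
        by_cases h : t = s
        · simp only [List.take_succ_cons, greedy, if_pos h, ih ss k]
          omega
        · simp only [List.take_succ_cons, greedy, if_neg h]
          have := ih (s :: ss) (k + 1)
          simpa using this

-- the bisection predicate decides k ≤ greedy S T (for k within the pattern)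
theorem isSub_take (S T : List Char) (k : Nat) (hk : k ≤ S.length) :
    isSub (S.take k) T = true ↔ k ≤ greedy S T := by
  have h0 : subGo (S.take k) T 0 = 0 + greedy ((S.take k).drop 0) T :=
    subGo_eq (S.take k) T 0 (Nat.zero_le _)
  simp only [isSub, h0, List.drop_zero, greedy_take, Nat.zero_add,
    List.length_take, beq_iff_eq]
  omega

-- the binary search converges to the greedy count
theorem bs_eq (S T : List Char) :
    ∀ lo hi, lo ≤ greedy S T → greedy S T ≤ hi → hi ≤ S.length →
      bs S T lo hi = greedy S T := by
  intro lo hi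
  induction lo, hi using bs.induct S T with
  | case1 lo hi h mid hsub ih =>
    intro h1 h2 h3
    have hmid : mid ≤ greedy S T := by
      have := (isSub_take S T mid (by omega)).mp hsub
      omega
    rw [bs, dif_pos h]
    show (if isSub (S.take mid) T then bs S T mid hi else bs S T lo (mid - 1)) = greedy S T
    rw [if_pos hsub]
    exact ih hmid h2 h3
  | case2 lo hi h mid hsub ih =>
    intro h1 h2 h3
    have hmid : ¬ mid ≤ greedy S T := fun hle =>
      hsub ((isSub_take S T mid (by omega)).mpr hle)
    rw [bs, dif_pos h]
    show (if isSub (S.take mid) T then bs S T mid hi else bs S T lo (mid - 1)) = greedy S T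
    rw [if_neg hsub]
    exact ih h1 (by omega) (by omega)
  | case3 lo hi h =>
    intro h1 h2 h3
    rw [bs, dif_neg h]
    omega

-- ===== VERDICT (by name: the statement is the Claim_ definition above) =====
theorem MaxPrefix_spec : Claim_equal_MaxPrefix := by
  intro S T _
  show MaxPrefix S T = MaxPrefix_alt S T
  unfold MaxPrefix MaxPrefix_alt
  rw [aGo_eq S.toList T.toList 0 (Nat.zero_le _),
    bs_eq S.toList T.toList 0 (min S.toList.length T.toList.length) (Nat.zero_le _)
      (le_min (greedy_le_left _ _) (greedy_le_right _ _)) (min_le_left _ _)]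
  simp
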